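-- pv_equiv track=rewrite | github.com/mitrandir-pl/AOIS | lab7/laba_7.py | recursive_find
-- ===== SOURCE A (Python) =====
-- def recursive_find(argument, word, i, mask=0):
--     temp = {}
--     temp1 = {}
--     if i + 1 == (len(word) - mask):
--         temp1["trigger_right"] = False
--         temp1["trigger_left"] = False
--     else:
--         temp1 = recursive_find(argument, word, i + 1, mask)
--     if (temp1["trigger_right"] or (argument[i] == "0" and word[i] == "1" and not(temp1["trigger_left"]))):
--         temp["trigger_right"] = True
--     else:
--         temp["trigger_right"] = False
--     if (temp1["trigger_left"] or (argument[i] == "1" and word[i] == "0" and not(temp1["trigger_right"]))):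
--         temp["trigger_left"] = True
--     else:
--         temp["trigger_left"] = False
--     return temp
-- ===== SOURCE B (Python) =====
-- def recursive_find(argument, word, i, mask=0):
--     right = False
--     left = False
--     for j in range(len(word) - mask - 1, i - 1, -1):
--         new_right = right or (argument[j] == "0" and word[j] == "1" and not left)
--         new_left = left or (argument[j] == "1" and word[j] == "0" and not right)
--         right, left = new_right, new_left
--     return {"trigger_right": right, "trigger_left": left}
-- ===== Notes on version B (the rewrite author's own statement) =====
-- stated objective: simpler
-- what changed: Replaces the N-deep recursion building a dict per level with a single descending loop that folds the two flags simultaneously over the bit indices.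
import Mathlib
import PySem

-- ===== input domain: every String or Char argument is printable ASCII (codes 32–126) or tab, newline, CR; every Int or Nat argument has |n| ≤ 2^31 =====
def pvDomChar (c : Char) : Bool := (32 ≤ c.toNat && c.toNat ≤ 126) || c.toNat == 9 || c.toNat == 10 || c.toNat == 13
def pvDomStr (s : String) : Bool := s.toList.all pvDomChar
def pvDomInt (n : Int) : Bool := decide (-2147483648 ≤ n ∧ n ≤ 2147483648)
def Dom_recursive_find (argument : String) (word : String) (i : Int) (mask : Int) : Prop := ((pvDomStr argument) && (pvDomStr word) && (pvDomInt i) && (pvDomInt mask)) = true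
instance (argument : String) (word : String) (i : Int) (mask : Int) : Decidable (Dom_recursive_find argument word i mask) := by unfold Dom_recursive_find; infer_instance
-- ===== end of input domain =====

-- B replaces A's N-deep recursion (a dict per level) with a single descending loop folding
-- the two trigger flags simultaneously; same return value, O(1) space instead of O(N) stack.

-- ===== PORT A =====
-- Python s[j] (raises on out-of-range; every reachable raise is excluded by Pre_, so getD is unreachable there)
def pvGetA (s : String) (j : Int) : Char := (PySem.Str.pyGet? s j).getD '?'

-- the recursion of A; fuel counts the remaining depth down to the base case i + 1 = len(word) - mask
def pvRecA (argument : String) (word : String) (i : Int) (fuel : Nat) : Bool × Bool :=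
  let temp1 : Bool × Bool :=
    match fuel with
    | 0 => (false, false)
    | Nat.succ f => pvRecA argument word (i + 1) f
  ((temp1.1 || (pvGetA argument i == '0' && pvGetA word i == '1' && !temp1.2)),
   (temp1.2 || (pvGetA argument i == '1' && pvGetA word i == '0' && !temp1.1)))

def recursive_find (argument : String) (word : String) (i : Int) (mask : Int) : List (String × Bool) :=
  let res := pvRecA argument word i (PySem.Str.len word - mask - 1 - i).toNat
  [("trigger_right", res.1), ("trigger_left", res.2)]

-- ===== PORT B =====
-- one loop iteration of Source B: simultaneous update of (right, left) from the old pair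
def pvStepB (a : List Char) (w : List Char) (rl : Bool × Bool) (j : Int) : Bool × Bool :=
  let new_right := rl.1 || ((PySem.List.pyGet? a j).getD '?' == '0' && (PySem.List.pyGet? w j).getD '?' == '1' && !rl.2)
  let new_left := rl.2 || ((PySem.List.pyGet? a j).getD '?' == '1' && (PySem.List.pyGet? w j).getD '?' == '0' && !rl.1)
  (new_right, new_left)

def recursive_find_alt (argument : String) (word : String) (i : Int) (mask : Int) : List (String × Bool) :=
  let res := (PySem.List.pyRange (PySem.Str.len word - mask - 1) (i - 1) (-1)).foldl
      (pvStepB argument.toList word.toList) (false, false)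
  [("trigger_right", res.1), ("trigger_left", res.2)]

-- ===== PRECONDITION & SPEC =====
-- Pre_ = exactly the inputs where A's recursion reaches its base case and every string index it
-- actually evaluates is in range: word[j] is only evaluated when argument[j] is '0' or '1' and no
-- trigger is set yet, so the word-side bound is only required at indices whose argument bit is 0/1
-- (a tiny residue — accesses also skipped because a trigger is already set — stays excluded).
def Pre_recursive_find (argument : String) (word : String) (i : Int) (mask : Int) : Prop :=
  i + 1 ≤ PySem.Str.len word - mask
  ∧ PySem.Str.len word - mask ≤ PySem.Str.len argument
  ∧ -(PySem.Str.len argument) ≤ i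
  ∧ ∀ j ∈ PySem.List.pyRange i (PySem.Str.len word - mask) 1,
      ((PySem.List.pyGet? argument.toList j).getD '?' = '0'
        ∨ (PySem.List.pyGet? argument.toList j).getD '?' = '1') →
      (-(PySem.Str.len word) ≤ j ∧ j < PySem.Str.len word)
instance (argument : String) (word : String) (i : Int) (mask : Int) : Decidable (Pre_recursive_find argument word i mask) := by unfold Pre_recursive_find; infer_instance

def pvWitness_recursive_find : String × String × Int × Int := ("10", "01", 0, 0)

def Spec_recursive_find (argument : String) (word : String) (i : Int) (mask : Int) (out : List (String × Bool)) : Prop := out = recursive_find_alt argument word i mask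
instance (argument : String) (word : String) (i : Int) (mask : Int) (out : List (String × Bool)) : Decidable (Spec_recursive_find argument word i mask out) := by unfold Spec_recursive_find; infer_instance

-- ===== CLAIM (what is proved, stated in full; the proofs are below) =====
def Claim_equal_recursive_find : Prop := ∀ (argument : String) (word : String) (i : Int) (mask : Int), Dom_recursive_find argument word i mask → Pre_recursive_find argument word i mask → Spec_recursive_find argument word i mask (recursive_find argument word i mask)

-- ===== LEMMAS AND PROOFS =====

-- B's step at j, written with A's character accessor: the two are the same function
lemma pvStepB_eq_getA (argument word : String) (rl : Bool × Bool) (j : Int) :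
    pvStepB argument.toList word.toList rl j =
      ((rl.1 || (pvGetA argument j == '0' && pvGetA word j == '1' && !rl.2)),
       (rl.2 || (pvGetA argument j == '1' && pvGetA word j == '0' && !rl.1))) := by
  simp [pvStepB, pvGetA, PySem.Str.pyGet?]

-- split the last (lowest) index off a countdown range
lemma pyRange_neg_one_snoc (hi lo : Int) (h : lo ≤ hi) :
    PySem.List.pyRange hi (lo - 1) (-1) = PySem.List.pyRange hi lo (-1) ++ [lo] := by
  rw [PySem.List.pyRange_neg_one_eq_reverse, PySem.List.pyRange_neg_one_eq_reverse]
  have h1 : lo - 1 + 1 = lo := by ring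
  rw [h1]
  rw [PySem.List.pyRange_one_cons (by omega : lo < hi + 1)]
  simp

-- A's recursion = B's fold over the countdown range, for exact fuel
lemma pvRecA_eq_foldl (argument word : String) :
    ∀ (fuel : Nat) (i : Int),
      pvRecA argument word i fuel =
        (PySem.List.pyRange (i + fuel) (i - 1) (-1)).foldl
          (pvStepB argument.toList word.toList) (false, false) := by
  intro fuel
  induction fuel with
  | zero =>
    intro i
    rw [show (i + (0 : Nat) : Int) = (i - 1) + 1 by push_cast; ring]
    rw [show ((i - 1) + 1 : Int) = i - 1 + 1 by ring]
    rw [PySem.List.pyRange_neg_one_cons (by omega : (i:Int) - 1 < i - 1 + 1)]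
    rw [show ((i - 1 + 1 : Int) - 1) = i - 1 by ring]
    rw [PySem.List.pyRange_neg_one_eq_nil (le_refl (i - 1))]
    rw [List.foldl_cons, List.foldl_nil, pvStepB_eq_getA]
    simp [pvRecA]
  | succ f ih =>
    intro i
    have hr : PySem.List.pyRange (i + (f + 1 : Nat)) (i - 1) (-1)
        = PySem.List.pyRange (i + (f + 1 : Nat)) i (-1) ++ [i] := by
      have := pyRange_neg_one_snoc (i + (f + 1 : Nat)) i (by push_cast; omega)
      simpa using this
    rw [hr, List.foldl_append, List.foldl_cons, List.foldl_nil]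
    have hr2 : PySem.List.pyRange (i + (f + 1 : Nat)) i (-1)
        = PySem.List.pyRange ((i + 1) + (f : Nat)) ((i + 1) - 1) (-1) := by
      congr 1 <;> push_cast <;> ring
    rw [hr2, ← ih (i + 1), pvStepB_eq_getA]
    simp [pvRecA]

-- ===== VERDICT (by name: the statement is the Claim_ definition above) =====
theorem recursive_find_spec : Claim_equal_recursive_find := by
  intro argument word i mask _ hpre
  unfold Spec_recursive_find recursive_find recursive_find_alt
  obtain ⟨h1, -, -, -⟩ := hpre
  have hfuel : i + ((PySem.Str.len word - mask - 1 - i).toNat : Int)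
      = PySem.Str.len word - mask - 1 := by omega
  rw [pvRecA_eq_foldl argument word ((PySem.Str.len word - mask - 1 - i).toNat) i, hfuel]
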